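-- pv_equiv track=rewrite | github.com/kirll-web/automats | lab2/mealy.py | get_map_classes
-- ===== SOURCE A (Python) =====
-- NAME_POINTS = "Q"
--
-- def get_map_classes(mealy_mass, g_map):
--     new_mealy_mass = dict()
--     new_mealy_mass[NAME_POINTS] = []
--     for index, line in enumerate(mealy_mass):
--         for kIndex, p in enumerate(mealy_mass[line]):
--             if line == NAME_POINTS:
--                 new_mealy_mass[NAME_POINTS].append(p)
--                 continue
--             if line not in new_mealy_mass: new_mealy_mass[line] = []
--             new_mealy_mass[line].append(g_map[p[0]])
--     map_classes = dict()
--     for column_index, point in enumerate(new_mealy_mass[NAME_POINTS]):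
--         line = ""
--         for line_index, ch_line in enumerate(new_mealy_mass):
--             if ch_line == NAME_POINTS: continue
--             transition = new_mealy_mass[ch_line][column_index]
--             line += f"{transition}/{mealy_mass[ch_line][column_index][1]};"
--         if line not in map_classes: map_classes[line] = dict()
--         map_classes[line][point] = ""
--
--     return map_classes
-- ===== SOURCE B (Python) =====
-- NAME_POINTS = "Q"
--
-- def get_map_classes(mealy_mass, g_map):
--     # Loop interchange: instead of recomputing each column's signature by an inner
--     # scan over the rows, walk the table row-major once, growing all column
--     # signatures in parallel, then group the points by their finished signature.
--     points = mealy_mass.get(NAME_POINTS, [])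
--     sigs = [""] * len(points)
--     for key, cells in mealy_mass.items():
--         if key == NAME_POINTS or not cells:
--             continue
--         sigs = [s + f"{g_map[cells[i][0]]}/{cells[i][1]};" for i, s in enumerate(sigs)]
--     map_classes = {}
--     for sig, point in zip(sigs, points):
--         if sig not in map_classes:
--             map_classes[sig] = {}
--         map_classes[sig][point] = ""
--     return map_classes
-- ===== Notes on version B (the rewrite author's own statement) =====
-- stated objective: alternative
-- what changed: B interchanges the loop nest: A materialises a mapped copy of the table and then, per point (column), rescans all rows to assemble its signature; B makes one row-major pass that grows all column signatures in parallel in a list, then groups the points by their finished signatures in a separate zip pass.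
import Mathlib
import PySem

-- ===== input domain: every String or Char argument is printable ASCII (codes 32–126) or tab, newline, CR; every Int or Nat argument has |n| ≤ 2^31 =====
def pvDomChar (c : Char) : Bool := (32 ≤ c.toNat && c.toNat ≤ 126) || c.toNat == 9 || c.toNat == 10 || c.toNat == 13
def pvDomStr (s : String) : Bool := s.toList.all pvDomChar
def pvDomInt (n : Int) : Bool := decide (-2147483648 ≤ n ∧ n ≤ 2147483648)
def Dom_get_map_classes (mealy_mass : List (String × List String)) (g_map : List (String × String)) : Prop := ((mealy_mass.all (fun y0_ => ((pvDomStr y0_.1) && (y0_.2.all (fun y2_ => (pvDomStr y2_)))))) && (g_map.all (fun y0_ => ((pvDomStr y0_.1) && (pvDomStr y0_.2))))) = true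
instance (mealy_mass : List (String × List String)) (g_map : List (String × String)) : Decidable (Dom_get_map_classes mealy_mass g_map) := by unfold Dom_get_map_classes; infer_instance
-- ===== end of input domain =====

-- B interchanges A's loop nest: one row-major pass grows all column signatures in
-- parallel, then the points are grouped by their finished signatures (objective: alternative).

-- ===== PORT A =====
-- g_map[p[0]]  (defaults are unreachable under Pre_: p is nonempty and p[0] is a key of g_map)
def pvCellA (gm : PySem.Dict String String) (p : String) : String :=
  gm.getD (String.ofList [(PySem.Str.pyGet? p 0).getD ' ']) ""

-- body of A's first loop over the cells p of the row named `line`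
def pvStepA (gm : PySem.Dict String String) (line : String)
    (nmm : PySem.Dict String (List String)) (p : String) : PySem.Dict String (List String) :=
  if line == "Q" then
    nmm.modify "Q" [] (fun l => l ++ [p])
  else
    (nmm.setdefault line []).modify line [] (fun l => l ++ [pvCellA gm p])

def get_map_classes (mealy_mass : List (String × List String)) (g_map : List (String × String)) : List (String × List (String × String)) :=
  let mm : PySem.Dict String (List String) := PySem.Dict.ofList mealy_mass
  let gm : PySem.Dict String String := PySem.Dict.ofList g_map
  let new_mealy_mass : PySem.Dict String (List String) :=
    mm.items.foldl (fun nmm kv => kv.2.foldl (pvStepA gm kv.1) nmm)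
      ((PySem.Dict.empty).insert "Q" [])
  let map_classes : PySem.Dict String (PySem.Dict String String) :=
    (PySem.List.enumerate (new_mealy_mass.getD "Q" [])).foldl (fun mc ci =>
      let line : String :=
        new_mealy_mass.items.foldl (fun s kv =>
          if kv.1 == "Q" then s
          else s ++ PySem.List.pyGetD kv.2 ci.1 "" ++ "/" ++
            String.ofList [(PySem.Str.pyGet? (PySem.List.pyGetD (mm.getD kv.1 []) ci.1 "") 1).getD ' '] ++ ";") ""
      (if mc.contains line then mc else mc.insert line PySem.Dict.empty).modify line
        PySem.Dict.empty (fun inner => inner.insert ci.2 "")) PySem.Dict.empty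
  map_classes.items.map (fun kv => (kv.1, kv.2.items))

-- ===== PORT B =====
-- f"{g_map[cells[i][0]]}/{cells[i][1]};"  (defaults unreachable under Pre_)
def pvSigPiece (gm : PySem.Dict String String) (col : Int) (cells : List String) : String :=
  gm.getD (String.ofList [(PySem.Str.pyGet? (PySem.List.pyGetD cells col "") 0).getD ' ']) "" ++ "/" ++
    String.ofList [(PySem.Str.pyGet? (PySem.List.pyGetD cells col "") 1).getD ' '] ++ ";"

-- sigs = [s + f"{g_map[cells[i][0]]}/{cells[i][1]};" for i, s in enumerate(sigs)]
def pvRowUpd (gm : PySem.Dict String String) (cells : List String) (sigs : List String) : List String :=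
  (PySem.List.enumerate sigs).map (fun is => is.2 ++ pvSigPiece gm is.1 cells)

def get_map_classes_alt (mealy_mass : List (String × List String)) (g_map : List (String × String)) : List (String × List (String × String)) :=
  let mm : PySem.Dict String (List String) := PySem.Dict.ofList mealy_mass
  let gm : PySem.Dict String String := PySem.Dict.ofList g_map
  let points : List String := mm.getD "Q" []
  let sigs : List String :=
    mm.items.foldl (fun sigs kv =>
      if kv.1 == "Q" || kv.2.isEmpty then sigs else pvRowUpd gm kv.2 sigs)
      (List.replicate points.length "")
  let map_classes : PySem.Dict String (PySem.Dict String String) :=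
    (sigs.zip points).foldl (fun mc sp =>
      (if mc.contains sp.1 then mc else mc.insert sp.1 PySem.Dict.empty).modify sp.1
        PySem.Dict.empty (fun inner => inner.insert sp.2 "")) PySem.Dict.empty
  map_classes.items.map (fun kv => (kv.1, kv.2.items))

-- ===== PRECONDITION & SPEC =====
-- Exactly the inputs on which the Python A returns: every cell of a nonempty non-"Q" row is a
-- nonempty string whose first character is a key of g_map (else KeyError/IndexError in the first
-- loop), the row is at least as long as the "Q" row (else IndexError in the signature loop), and
-- its cells at the columns the signature loop reads have a second character (else IndexError).
def Pre_get_map_classes (mealy_mass : List (String × List String)) (g_map : List (String × String)) : Prop :=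
  ∀ kv ∈ (PySem.Dict.ofList mealy_mass).items, kv.1 ≠ "Q" → kv.2 ≠ [] →
    ((PySem.Dict.ofList mealy_mass).getD "Q" []).length ≤ kv.2.length ∧
    (∀ p ∈ kv.2, p.toList ≠ [] ∧
      (PySem.Dict.ofList g_map).contains (String.ofList [(PySem.Str.pyGet? p 0).getD ' ']) = true) ∧
    (∀ i : Nat, i < ((PySem.Dict.ofList mealy_mass).getD "Q" []).length →
      2 ≤ (kv.2.getD i "").toList.length)
instance (mealy_mass : List (String × List String)) (g_map : List (String × String)) : Decidable (Pre_get_map_classes mealy_mass g_map) := by unfold Pre_get_map_classes; infer_instance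

def pvWitness_get_map_classes : (List (String × List String)) × (List (String × String)) :=
  ([("Q", ["s0", "s1"]), ("x", ["a0", "a1"])], [("a", "A")])

def Spec_get_map_classes (mealy_mass : List (String × List String)) (g_map : List (String × String)) (out : List (String × List (String × String))) : Prop := out = get_map_classes_alt mealy_mass g_map
instance (mealy_mass : List (String × List String)) (g_map : List (String × String)) (out : List (String × List (String × String))) : Decidable (Spec_get_map_classes mealy_mass g_map out) := by unfold Spec_get_map_classes; infer_instance

-- ===== CLAIM (what is proved, stated in full; the proofs are below) =====
def Claim_equal_get_map_classes : Prop := ∀ (mealy_mass : List (String × List String)) (g_map : List (String × String)), Dom_get_map_classes mealy_mass g_map → Pre_get_map_classes mealy_mass g_map → Spec_get_map_classes mealy_mass g_map (get_map_classes mealy_mass g_map)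

-- ===== LEMMAS AND PROOFS =====

-- "".join(x :: l) = x ++ "".join(l)
theorem pvJoin_nil : PySem.Str.join "" [] = "" := rfl

theorem pvJoin_cons (x : String) (l : List String) :
    PySem.Str.join "" (x :: l) = x ++ PySem.Str.join "" l := by
  cases l with
  | nil => simp [PySem.Str.join, PySem.Chars.join, List.intercalate, String.ofList_toList]
  | cons y l =>
    simp [PySem.Str.join, PySem.Chars.join, List.intercalate, List.intersperse,
      String.ofList_append, String.ofList_toList]

-- modifying the key sitting (uniquely) at the END of the dict rewrites just that entry
theorem pvModify_last (line : String) (f : List String → List String) (acc : List String)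
    (items : List (String × List String)) (hitems : ∀ kv ∈ items, kv.1 ≠ line) :
    PySem.Dict.modify ⟨items ++ [(line, acc)]⟩ line [] f = ⟨items ++ [(line, f acc)]⟩ := by
  have hfind : List.find? (fun p => p.1 == line) items = none := by
    rw [List.find?_eq_none]
    intro kv hkv
    simp [hitems kv hkv]
  have hc : (PySem.Dict.contains (⟨items ++ [(line, acc)]⟩ : PySem.Dict String (List String)) line) = true := by
    simp [PySem.Dict.contains]
  have hg : (PySem.Dict.getD (⟨items ++ [(line, acc)]⟩ : PySem.Dict String (List String)) line []) = acc := by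
    simp only [PySem.Dict.getD, PySem.Dict.get?, PySem.Dict.items]
    rw [List.find?_append, hfind]
    simp
  rw [PySem.Dict.modify, hg, PySem.Dict.insert, if_pos hc]
  refine congrArg _ ?_
  rw [List.map_append]
  refine congrArg₂ _ ?_ (by simp)
  conv_rhs => rw [← List.map_id items]
  apply List.map_congr_left
  intro kv hkv
  simp [hitems kv hkv]

-- A's "Q"-row inner loop appends the points to the "Q" entry in place.
theorem pvStepA_Q (gm : PySem.Dict String String) (row q : List String)
    (rest : List (String × List String)) (hrest : ∀ kv ∈ rest, kv.1 ≠ "Q") :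
    row.foldl (pvStepA gm "Q") ⟨("Q", q) :: rest⟩ = ⟨("Q", q ++ row) :: rest⟩ := by
  induction row generalizing q with
  | nil => simp
  | cons p row ih =>
    have h1 : (pvStepA gm "Q" ⟨("Q", q) :: rest⟩ p) = (⟨("Q", q ++ [p]) :: rest⟩ : PySem.Dict String (List String)) := by
      simp only [pvStepA, PySem.Dict.modify, PySem.Dict.insert, PySem.Dict.contains,
        PySem.Dict.getD, PySem.Dict.get?, PySem.Dict.items]
      simp only [beq_self_eq_true, if_pos, List.any_cons, List.find?_cons]
      simp only [beq_self_eq_true, Bool.true_or, if_pos, List.map_cons, if_pos rfl]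
      refine congrArg _ (congrArg _ ?_)
      conv_rhs => rw [← List.map_id rest]
      apply List.map_congr_left
      intro kv hkv
      simp [beq_iff_eq, hrest kv hkv]
    simp only [List.foldl_cons, h1, ih (q ++ [p]) , List.append_assoc, List.cons_append,
      List.nil_append]

-- A's inner loop over a row of a key already sitting (with no duplicate) at the END of the dict
-- keeps growing that last entry in place.
theorem pvStepA_grow (gm : PySem.Dict String String) (line : String) (hline : line ≠ "Q")
    (row : List String) (acc : List String) (items : List (String × List String))
    (hitems : ∀ kv ∈ items, kv.1 ≠ line) :
    row.foldl (pvStepA gm line) ⟨items ++ [(line, acc)]⟩ =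
      ⟨items ++ [(line, acc ++ row.map (pvCellA gm))]⟩ := by
  induction row generalizing acc with
  | nil => simp
  | cons p row ih =>
    have hc : (PySem.Dict.contains (⟨items ++ [(line, acc)]⟩ : PySem.Dict String (List String)) line) = true := by
      simp [PySem.Dict.contains]
    have h1 : (pvStepA gm line ⟨items ++ [(line, acc)]⟩ p) =
        (⟨items ++ [(line, acc ++ [pvCellA gm p])]⟩ : PySem.Dict String (List String)) := by
      rw [pvStepA, if_neg (by simp [hline]), PySem.Dict.setdefault, if_pos hc,
        pvModify_last line _ acc items hitems]
    rw [List.foldl_cons, h1, ih (acc ++ [pvCellA gm p])]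
    simp

-- … and a fresh non-"Q" key with a nonempty row is appended at the end, mapped through pvCellA.
theorem pvStepA_fresh (gm : PySem.Dict String String) (line : String) (hline : line ≠ "Q")
    (p : String) (row : List String) (items : List (String × List String))
    (hitems : ∀ kv ∈ items, kv.1 ≠ line) :
    (p :: row).foldl (pvStepA gm line) ⟨items⟩ =
      ⟨items ++ [(line, (p :: row).map (pvCellA gm))]⟩ := by
  have hc : (PySem.Dict.contains (⟨items⟩ : PySem.Dict String (List String)) line) = false := by
    simp only [PySem.Dict.contains, PySem.Dict.items, List.any_eq_false]
    intro kv hkv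
    simp [hitems kv hkv]
  have h1 : (pvStepA gm line ⟨items⟩ p) =
      (⟨items ++ [(line, [pvCellA gm p])]⟩ : PySem.Dict String (List String)) := by
    rw [pvStepA, if_neg (by simp [hline]), PySem.Dict.setdefault, if_neg (by simp [hc]),
      show (⟨items⟩ : PySem.Dict String (List String)).items ++ [(line, [])] = items ++ [(line, [])] from rfl,
      pvModify_last line _ [] items hitems]
    simp
  rw [List.foldl_cons, h1, pvStepA_grow gm line hline row [pvCellA gm p] items hitems]
  simp

-- Characterisation of A's whole first loop.
theorem pvBuildA_spec (gm : PySem.Dict String String) (l : List (String × List String))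
    (q : List String) (rest : List (String × List String))
    (hnd : (l.map Prod.fst).Nodup)
    (hdisj : ∀ kv ∈ l, kv.1 ∉ rest.map Prod.fst)
    (hrest : ∀ kv ∈ rest, kv.1 ≠ "Q") :
    l.foldl (fun nmm kv => kv.2.foldl (pvStepA gm kv.1) nmm) ⟨("Q", q) :: rest⟩ =
      ⟨("Q", q ++ ((l.find? (fun kv => kv.1 == "Q")).map Prod.snd).getD []) ::
        (rest ++ (l.filter (fun kv => kv.1 != "Q" && !kv.2.isEmpty)).map
          (fun kv => (kv.1, kv.2.map (pvCellA gm))))⟩ := by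
  induction l generalizing q rest with
  | nil => simp
  | cons kv l ih =>
    by_cases hQ : kv.1 = "Q"
    · have hfind : l.find? (fun kv => kv.1 == "Q") = none := by
        rw [List.find?_eq_none]
        intro x hx
        simp only [List.map_cons, List.nodup_cons, List.mem_map] at hnd
        simp only [beq_iff_eq]
        intro hxQ
        exact hnd.1 ⟨x, hx, by rw [hxQ, hQ]⟩
      have hfilter : (List.filter (fun kv => kv.1 != "Q" && !kv.2.isEmpty) (kv :: l)) =
          l.filter (fun kv => kv.1 != "Q" && !kv.2.isEmpty) := by
        simp [List.filter_cons, hQ]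
      rw [List.foldl_cons]
      rw [show kv.2.foldl (pvStepA gm kv.1) ⟨("Q", q) :: rest⟩ = ⟨("Q", q ++ kv.2) :: rest⟩ by
        rw [hQ] at *; exact pvStepA_Q gm kv.2 q rest hrest]
      rw [ih (q ++ kv.2) rest (by simpa using hnd.of_cons) (fun x hx => hdisj x (List.mem_cons_of_mem _ hx)) hrest]
      simp [hfilter, List.find?_cons, hQ, hfind]
    · cases hrow : kv.2 with
      | nil =>
        rw [List.foldl_cons, hrow, List.foldl_nil]
        rw [ih q rest (by simpa using hnd.of_cons) (fun x hx => hdisj x (List.mem_cons_of_mem _ hx)) hrest]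
        simp [List.filter_cons, List.find?_cons, hrow, beq_iff_eq, hQ]
      | cons p row =>
        rw [List.foldl_cons, hrow]
        rw [show (p :: row).foldl (pvStepA gm kv.1) ⟨("Q", q) :: rest⟩ =
            ⟨(("Q", q) :: rest) ++ [(kv.1, (p :: row).map (pvCellA gm))]⟩ from
          pvStepA_fresh gm kv.1 hQ p row (("Q", q) :: rest)
            (by
              intro x hx
              rcases List.mem_cons.mp hx with h | h
              · rw [h]; exact fun hc => hQ hc.symm
              · intro hc
                exact hdisj kv (List.mem_cons_self) (hc ▸ List.mem_map_of_mem h))]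
        rw [show ((("Q", q) :: rest) ++ [(kv.1, (p :: row).map (pvCellA gm))] : List (String × List String)) =
          ("Q", q) :: (rest ++ [(kv.1, (p :: row).map (pvCellA gm))]) by simp]
        rw [ih q (rest ++ [(kv.1, (p :: row).map (pvCellA gm))])
          (by simpa using hnd.of_cons)
          (by
            intro x hx
            simp only [List.map_append, List.mem_append, List.map_cons, List.map_nil,
              List.mem_singleton, not_or]
            refine ⟨fun hc => hdisj x (List.mem_cons_of_mem _ hx) hc, ?_⟩
            simp only [List.map_cons, List.nodup_cons, List.mem_map] at hnd
            intro hc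
            exact hnd.1 ⟨x, hx, by simpa using hc⟩)
          (by
            intro x hx
            rcases List.mem_append.mp hx with h | h
            · exact hrest x h
            · simp only [List.mem_singleton] at h
              rw [h]; exact hQ)]
        simp [List.filter_cons, List.find?_cons, beq_iff_eq, hQ, hrow]

-- A's signature loop over a list whose keys are all ≠ "Q" is "".join of the per-row pieces.
theorem pvSigFold (g : String × List String → String) (l : List (String × List String))
    (hl : ∀ kv ∈ l, kv.1 ≠ "Q") (s0 : String) :
    l.foldl (fun s kv => if kv.1 == "Q" then s else s ++ g kv) s0 =
      s0 ++ PySem.Str.join "" (l.map g) := by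
  induction l generalizing s0 with
  | nil => simp [pvJoin_nil, String.append_empty]
  | cons kv l ih =>
    rw [List.foldl_cons, if_neg (by simp [beq_iff_eq, hl kv List.mem_cons_self]),
      ih (fun x hx => hl x (List.mem_cons_of_mem _ hx)), List.map_cons, pvJoin_cons,
      String.append_assoc]

-- B's row-major fold: length is preserved and each column accumulates its row pieces.
theorem pvSigsB_spec (gm : PySem.Dict String String) (l : List (String × List String))
    (sigs0 : List String) :
    (l.foldl (fun sigs kv => if kv.1 == "Q" || kv.2.isEmpty then sigs else pvRowUpd gm kv.2 sigs) sigs0).length = sigs0.length ∧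
    ∀ k : Nat, ∀ hk : k < sigs0.length,
      (l.foldl (fun sigs kv => if kv.1 == "Q" || kv.2.isEmpty then sigs else pvRowUpd gm kv.2 sigs) sigs0).getD k "" =
        sigs0[k] ++ PySem.Str.join ""
          (((l.filter (fun kv => kv.1 != "Q" && !kv.2.isEmpty)).map (fun kv => kv.2)).map
            (fun cells => pvSigPiece gm (k : Int) cells)) := by
  induction l generalizing sigs0 with
  | nil =>
    refine ⟨rfl, ?_⟩
    intro k hk
    simp [pvJoin_nil, List.getD_eq_getElem _ _ hk, List.getElem?_eq_getElem hk, String.append_empty]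
  | cons kv l ih =>
    by_cases hskip : (kv.1 == "Q" || kv.2.isEmpty) = true
    · have hfilter : (List.filter (fun kv => kv.1 != "Q" && !kv.2.isEmpty) (kv :: l)) =
          l.filter (fun kv => kv.1 != "Q" && !kv.2.isEmpty) := by
        rcases Bool.or_eq_true_iff.mp hskip with h | h
        · simp [List.filter_cons, beq_iff_eq.mp h]
        · simp [List.filter_cons, h]
      simp only [List.foldl_cons, if_pos hskip, hfilter]
      exact ih sigs0
    · have hupd : (pvRowUpd gm kv.2 sigs0).length = sigs0.length := by
        simp [pvRowUpd, PySem.List.length_enumerate]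
      have hget : ∀ k : Nat, ∀ hk : k < sigs0.length,
          (pvRowUpd gm kv.2 sigs0)[k]'(by rw [hupd]; exact hk) =
            sigs0[k] ++ pvSigPiece gm (k : Int) kv.2 := by
        intro k hk
        simp [pvRowUpd, PySem.List.getElem_enumerate]
      have hfilter : (List.filter (fun kv => kv.1 != "Q" && !kv.2.isEmpty) (kv :: l)) =
          kv :: l.filter (fun kv => kv.1 != "Q" && !kv.2.isEmpty) := by
        rw [List.filter_cons, if_pos]
        simp only [Bool.or_eq_true, not_or] at hskip
        push_neg at hskip
        simp only [Bool.and_eq_true, bne_iff_ne, Bool.not_eq_true']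
        exact ⟨by simpa using hskip.1, by simpa using hskip.2⟩
      obtain ⟨ihlen, ihget⟩ := ih (pvRowUpd gm kv.2 sigs0)
      refine ⟨?_, ?_⟩
      · simp only [List.foldl_cons, if_neg hskip]
        rw [ihlen, hupd]
      · intro k hk
        simp only [List.foldl_cons, if_neg hskip, hfilter, List.map_cons, pvJoin_cons]
        rw [ihget k (by rw [hupd]; exact hk), hget k hk, String.append_assoc]

-- zip of the finished signatures with the points, rewritten as a map over enumerate.
theorem pvZip_as_enum (sigs points : List String) (f : Int → String)
    (hlen : sigs.length = points.length)
    (hf : ∀ k : Nat, k < points.length → sigs.getD k "" = f (k : Int)) :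
    sigs.zip points = (PySem.List.enumerate points).map (fun ci => (f ci.1, ci.2)) := by
  apply List.ext_getElem
  · simp [hlen, PySem.List.length_enumerate]
  · intro i h1 h2
    have hi : i < points.length := by simpa [PySem.List.length_enumerate] using h2
    have hi' : i < sigs.length := by rw [hlen]; exact hi
    rw [List.getElem_zip, List.getElem_map, PySem.List.getElem_enumerate]
    have := hf i hi
    rw [List.getD_eq_getElem _ _ hi'] at this
    simp [this]

-- ===== VERDICT (by name: the statement is the Claim_ definition above) =====
theorem get_map_classes_spec : Claim_equal_get_map_classes := by
  intro mealy_mass g_map _hdom hpre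
  show get_map_classes mealy_mass g_map = get_map_classes_alt mealy_mass g_map
  unfold Pre_get_map_classes at hpre
  simp only [get_map_classes, get_map_classes_alt]
  set mm : PySem.Dict String (List String) := PySem.Dict.ofList mealy_mass with hmm
  set gm : PySem.Dict String String := PySem.Dict.ofList g_map with hgm
  have hnd : (mm.items.map Prod.fst).Nodup := PySem.Dict.nodup_keys_ofList mealy_mass
  have hinit : ((PySem.Dict.empty : PySem.Dict String (List String)).insert "Q" []) =
      (⟨[("Q", [])]⟩ : PySem.Dict String (List String)) := rfl
  rw [hinit,
    pvBuildA_spec gm mm.items [] [] hnd (by simp) (by simp)]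
  have hP : ([] ++ ((mm.items.find? (fun kv => kv.1 == "Q")).map Prod.snd).getD [] : List String) =
      mm.getD "Q" [] := by
    simp [PySem.Dict.getD, PySem.Dict.get?]
  rw [hP]
  set M : List (String × List String) :=
    ([] ++ (mm.items.filter (fun kv => kv.1 != "Q" && !kv.2.isEmpty)).map
      (fun kv => (kv.1, kv.2.map (pvCellA gm)))) with hM
  have hQget : (⟨("Q", mm.getD "Q" []) :: M⟩ : PySem.Dict String (List String)).getD "Q" [] =
      mm.getD "Q" [] := by
    simp [PySem.Dict.getD, PySem.Dict.get?]
  rw [hQget]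
  set points : List String := mm.getD "Q" [] with hpoints
  -- the per-column signature both sides compute
  set f : Int → String := fun col => PySem.Str.join ""
    (((mm.items.filter (fun kv => kv.1 != "Q" && !kv.2.isEmpty)).map (fun kv => kv.2)).map
      (fun cells => pvSigPiece gm col cells)) with hf
  refine congrArg (fun d : PySem.Dict String (PySem.Dict String String) => d.items.map (fun kv => (kv.1, kv.2.items))) ?_
  -- B's signature list matches f
  obtain ⟨hBlen, hBget⟩ := pvSigsB_spec gm mm.items (List.replicate points.length "")
  have hzip : (mm.items.foldl (fun sigs kv => if kv.1 == "Q" || kv.2.isEmpty then sigs else pvRowUpd gm kv.2 sigs) (List.replicate points.length "")).zip points =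
      (PySem.List.enumerate points).map (fun ci => (f ci.1, ci.2)) := by
    apply pvZip_as_enum _ _ f (by rw [hBlen]; simp)
    intro k hk
    rw [hBget k (by simpa using hk)]
    simp [hf]
  rw [hzip, List.foldl_map]
  -- A's per-column signature equals f applied at that column
  apply PySem.List.foldl_congr_mem
  intro acc ci hci
  rw [PySem.List.mem_enumerate_iff] at hci
  obtain ⟨k, hk, hcieq⟩ := hci
  subst hcieq
  simp only [zero_add]
  have hsig : ((⟨("Q", points) :: M⟩ : PySem.Dict String (List String)).items.foldl
      (fun s kv =>
        if kv.1 == "Q" then s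
        else s ++ PySem.List.pyGetD kv.2 (↑k) "" ++ "/" ++
          String.ofList [(PySem.Str.pyGet? (PySem.List.pyGetD (mm.getD kv.1 []) (↑k) "") 1).getD ' '] ++ ";") "") =
      f (↑k) := by
    show (("Q", points) :: M).foldl _ "" = _
    rw [List.foldl_cons, if_pos (by simp)]
    have hMkeys : ∀ kv ∈ M, kv.1 ≠ "Q" := by
      intro kv hkv
      rw [hM] at hkv
      simp only [List.nil_append, List.mem_map, List.mem_filter] at hkv
      obtain ⟨y, ⟨_, hy⟩, rfl⟩ := hkv
      simpa using (Bool.and_elim_left hy)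
    rw [PySem.List.foldl_congr_mem M _
      (fun s kv =>
        if kv.1 == "Q" then s
        else s ++ (PySem.List.pyGetD kv.2 (↑k) "" ++ ("/" ++
          (String.ofList [(PySem.Str.pyGet? (PySem.List.pyGetD (mm.getD kv.1 []) (↑k) "") 1).getD ' '] ++ ";")))) ""
      (by
        intro acc' kv _
        by_cases h : kv.1 = "Q" <;> simp [h, String.append_assoc])]
    rw [pvSigFold (fun kv => PySem.List.pyGetD kv.2 (↑k) "" ++ ("/" ++
        (String.ofList [(PySem.Str.pyGet? (PySem.List.pyGetD (mm.getD kv.1 []) (↑k) "") 1).getD ' '] ++ ";"))) M hMkeys ""]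
    rw [show ∀ t : String, "" ++ t = t from fun t => by simp]
    rw [hM, hf]
    simp only [List.nil_append, List.map_map]
    apply congrArg
    apply List.map_congr_left
    intro kv hkv
    have hkv' := List.mem_filter.mp hkv
    have hne : kv.1 ≠ "Q" := by simpa using Bool.and_elim_left hkv'.2
    have hnemp : kv.2 ≠ [] := by simpa using Bool.and_elim_right hkv'.2
    have hlen := (hpre kv hkv'.1 hne hnemp).1
    have hklt : k < kv.2.length := lt_of_lt_of_le hk hlen
    have hmmget : mm.getD kv.1 [] = kv.2 := PySem.Dict.getD_of_mem_items mm hkv'.1 hnd []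
    have h1 : PySem.List.pyGetD (kv.2.map (pvCellA gm)) (↑k) "" = pvCellA gm (kv.2[k]) := by
      rw [PySem.List.pyGetD_natCast, List.getD_eq_getElem _ _ (by simpa using hklt), List.getElem_map]
    have h2 : PySem.List.pyGetD kv.2 (↑k) "" = kv.2[k] := by
      rw [PySem.List.pyGetD_natCast, List.getD_eq_getElem _ _ hklt]
    simp only [Function.comp, hmmget, h1, h2, pvSigPiece, pvCellA, String.append_assoc]
  rw [show ((⟨("Q", points) :: M⟩ : PySem.Dict String (List String)).items) =
      ("Q", points) :: M from rfl] at hsig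
  simp only [hsig]
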